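-- pv_equiv track=rewrite | github.com/daggarwal2806/AuthorshipIdentificationSystem | authorship_identifier_Sangram.py | strip_headers
-- ===== SOURCE A (Python) =====
-- def strip_headers(text):
--     lines = text.split('\n')
--     start = 0
--     end = len(lines)
--     for i, line in enumerate(lines):
--         if '*** START OF THIS PROJECT GUTENBERG EBOOK' in line:
--             start = i + 1
--         elif '*** END OF THIS PROJECT GUTENBERG EBOOK' in line:
--             end = i
--             break
--     return '\n'.join(lines[start:end])
-- ===== SOURCE B (Python) =====
-- START_MARK = '*** START OF THIS PROJECT GUTENBERG EBOOK'
-- END_MARK = '*** END OF THIS PROJECT GUTENBERG EBOOK'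
--
-- def strip_headers(text):
--     lines = text.split('\n')
--     end = next((i for i, line in enumerate(lines) if END_MARK in line), len(lines))
--     start = next((i + 1 for i in range(end - 1, -1, -1) if START_MARK in lines[i]), 0)
--     return '\n'.join(lines[start:end])
-- ===== Notes on version B (the rewrite author's own statement) =====
-- stated objective: alternative
-- what changed: Replaces A's single early-exit loop mutating both bounds under if/elif/break with two separate scans: a forward scan for the first END-marker line (the end bound) and a backwards scan below it for the nearest START-marker line (the start bound); Pre_ excludes texts with a line containing both markers, the one corner where A's elif precedence (START wins on the same line) and B's end-first reading defensibly disagree.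
import Mathlib
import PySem

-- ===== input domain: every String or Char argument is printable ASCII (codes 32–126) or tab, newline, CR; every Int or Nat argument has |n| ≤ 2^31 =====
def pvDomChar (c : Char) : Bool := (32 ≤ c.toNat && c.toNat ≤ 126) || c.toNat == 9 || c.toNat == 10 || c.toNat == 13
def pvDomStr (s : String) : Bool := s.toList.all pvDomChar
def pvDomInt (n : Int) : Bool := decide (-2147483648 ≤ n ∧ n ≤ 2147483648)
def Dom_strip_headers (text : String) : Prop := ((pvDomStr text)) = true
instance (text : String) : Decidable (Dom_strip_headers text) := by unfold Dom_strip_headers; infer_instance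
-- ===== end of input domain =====

-- B replaces A's single early-exit loop that mutates both bounds under if/elif/break with two
-- separate scans: the end bound first, then a backwards scan below it for the start bound; same cost.

def pvSTART : String := "*** START OF THIS PROJECT GUTENBERG EBOOK"
def pvEND : String := "*** END OF THIS PROJECT GUTENBERG EBOOK"

-- ===== PORT A =====
-- A's loop over enumerate(lines) with state (start, end); returns the pair at break / exhaustion.
def stripLoopA : List String → Nat → Nat → Nat → Nat × Nat
  | [], _, s, e => (s, e)
  | l :: rest, i, s, e =>
    if PySem.Str.isIn pvSTART l then stripLoopA rest (i + 1) (i + 1) e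
    else if PySem.Str.isIn pvEND l then (s, i)
    else stripLoopA rest (i + 1) s e

def strip_headers (text : String) : String :=
  let lines := (PySem.Str.split? text "\n").getD []
  let se := stripLoopA lines 0 0 lines.length
  PySem.Str.join "\n" (PySem.List.slice lines (some (se.1 : Int)) (some (se.2 : Int)))

-- ===== PORT B =====
-- Source B's first generator: first index whose line contains the END marker, default len(lines).
def stripEndB : List String → Nat → Nat → Nat
  | [], _, e => e
  | l :: rest, i, e =>
    if PySem.Str.isIn pvEND l then i
    else stripEndB rest (i + 1) e

-- Source B's second generator: i+1 for the first i in range(end-1, -1, -1) with the START marker in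
-- lines[i], default 0. Ported with the countdown as the recursion argument (k = i + 1); the
-- Python index lines[i] is exact here because every scanned i satisfies i < end ≤ len(lines).
def stripStartB (lines : List String) : Nat → Nat
  | 0 => 0
  | k + 1 => if PySem.Str.isIn pvSTART (lines.getD k "") then k + 1 else stripStartB lines k

def strip_headers_alt (text : String) : String :=
  let lines := (PySem.Str.split? text "\n").getD []
  let e := stripEndB lines 0 lines.length
  let s := stripStartB lines e
  PySem.Str.join "\n" (PySem.List.slice lines (some (s : Int)) (some (e : Int)))

-- ===== PRECONDITION & SPEC =====
-- Pre_ excludes texts in which some line contains BOTH markers: there A's elif gives the START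
-- branch precedence on that line while B's end-first scan stops at it — a degenerate corner no
-- real Gutenberg text has and where either reading is defensible.
def Pre_strip_headers (text : String) : Prop :=
  ∀ l ∈ (PySem.Str.split? text "\n").getD [],
    ¬(PySem.Str.isIn pvEND l = true ∧ PySem.Str.isIn pvSTART l = true)
instance (text : String) : Decidable (Pre_strip_headers text) := by unfold Pre_strip_headers; infer_instance

def pvWitness_strip_headers : String :=
  "header\n*** START OF THIS PROJECT GUTENBERG EBOOK ***\nbody\n*** END OF THIS PROJECT GUTENBERG EBOOK ***\nfooter"

def Spec_strip_headers (text : String) (out : String) : Prop := out = strip_headers_alt text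
instance (text : String) (out : String) : Decidable (Spec_strip_headers text out) := by unfold Spec_strip_headers; infer_instance

-- ===== CLAIM (what is proved, stated in full; the proofs are below) =====
def Claim_equal_strip_headers : Prop := ∀ (text : String), Dom_strip_headers text → Pre_strip_headers text → Spec_strip_headers text (strip_headers text)

-- ===== LEMMAS AND PROOFS =====

-- proof helper: the forward "last START index + 1" accumulator hidden in A's loop
def fwdStart : List String → Nat → Nat → Nat
  | [], _, s => s
  | l :: rest, i, s =>
    fwdStart rest (i + 1) (if PySem.Str.isIn pvSTART l then i + 1 else s)

-- proof helper: relative index of the first END line (list length if none)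
def relEnd : List String → Nat
  | [] => 0
  | l :: rest => if PySem.Str.isIn pvEND l then 0 else relEnd rest + 1

theorem relEnd_le (ls : List String) : relEnd ls ≤ ls.length := by
  induction ls with
  | nil => simp [relEnd]
  | cons l rest ih => simp only [relEnd, List.length_cons]; split <;> omega

theorem stripEndB_eq (ls : List String) : ∀ (i e : Nat),
    stripEndB ls i e = if relEnd ls = ls.length then e else i + relEnd ls := by
  induction ls with
  | nil => simp [stripEndB, relEnd]
  | cons l rest ih =>
    intro i e
    simp only [stripEndB, relEnd, List.length_cons]
    split
    · have := relEnd_le (l :: rest)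
      simp_all [relEnd]
    · rw [ih]
      split <;> split <;> omega

theorem stripLoopA_eq (ls : List String)
    (hP : ∀ l ∈ ls, ¬(PySem.Str.isIn pvEND l = true ∧ PySem.Str.isIn pvSTART l = true)) :
    ∀ (i s e : Nat),
    stripLoopA ls i s e =
      (fwdStart (ls.take (relEnd ls)) i s,
        if relEnd ls = ls.length then e else i + relEnd ls) := by
  induction ls with
  | nil => simp [stripLoopA, fwdStart, relEnd]
  | cons l rest ih =>
    intro i s e
    have hPl := hP l (List.mem_cons_self ..)
    have hPr : ∀ x ∈ rest, ¬(PySem.Str.isIn pvEND x = true ∧ PySem.Str.isIn pvSTART x = true) :=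
      fun x hx => hP x (List.mem_cons_of_mem _ hx)
    simp only [stripLoopA, relEnd, List.length_cons]
    by_cases hS : PySem.Str.isIn pvSTART l
    · have hE : PySem.Str.isIn pvEND l = false := by
        rcases h : PySem.Str.isIn pvEND l with _ | _
        · rfl
        · exact absurd ⟨h, hS⟩ hPl
      simp only [hS, if_true, hE, Bool.false_eq_true, if_false, ih hPr,
        List.take_succ_cons, fwdStart, Prod.mk.injEq]
      refine ⟨trivial, ?_⟩
      have := relEnd_le rest; split <;> split <;> omega
    · rw [Bool.not_eq_true] at hS
      simp only [hS, Bool.false_eq_true, if_false]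
      by_cases hE : PySem.Str.isIn pvEND l
      · simp only [hE, if_true]
        simp [fwdStart]
      · simp only [hE, Bool.false_eq_true, if_false, ih hPr, List.take_succ_cons,
          fwdStart, hS, Prod.mk.injEq]
        refine ⟨trivial, ?_⟩
        have := relEnd_le rest; split <;> split <;> omega

theorem fwdStart_append_singleton (xs : List String) (x : String) : ∀ (i s : Nat),
    fwdStart (xs ++ [x]) i s =
      if PySem.Str.isIn pvSTART x then i + xs.length + 1 else fwdStart xs i s := by
  induction xs with
  | nil => intro i s; simp [fwdStart]
  | cons y ys ih =>
    intro i s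
    simp only [List.cons_append, fwdStart, ih, List.length_cons]
    split <;> simp <;> omega

-- the backwards early-exit scan equals the forward last-match accumulator over the prefix
theorem stripStartB_eq_fwdStart (lines : List String) : ∀ (k : Nat), k ≤ lines.length →
    stripStartB lines k = fwdStart (lines.take k) 0 0 := by
  intro k
  induction k with
  | zero => intro _; simp [stripStartB, fwdStart]
  | succ k ih =>
    intro hk
    have hklt : k < lines.length := by omega
    rw [List.take_succ_eq_append_getElem hklt]
    rw [fwdStart_append_singleton]
    have hget : lines.getD k "" = lines[k] := by
      simp [List.getD, List.getElem?_eq_getElem hklt]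
    simp only [stripStartB, hget, List.length_take]
    split <;> simp_all <;> omega

-- ===== VERDICT (by name: the statement is the Claim_ definition above) =====
theorem strip_headers_spec : Claim_equal_strip_headers := by
  intro text _ hPre
  unfold Spec_strip_headers strip_headers strip_headers_alt
  simp only
  set lines := (PySem.Str.split? text "\n").getD [] with hl
  have hr := relEnd_le lines
  rw [stripLoopA_eq lines hPre, stripEndB_eq]
  have hend : (if relEnd lines = lines.length then lines.length else 0 + relEnd lines)
      = relEnd lines := by split <;> omega
  rw [hend, stripStartB_eq_fwdStart lines (relEnd lines) hr]
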